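-- pv_equiv track=rewrite | github.com/kchandel432/scanner | backend/utils/file_analyzer.py | _find_suspicious_strings
-- ===== SOURCE A (Python) =====
-- from typing import Dict, Any, Optional, List
--
-- def _find_suspicious_strings(strings: List[str]) -> List[str]:
--     """Find suspicious strings in file"""
--     suspicious_patterns = [
--         'CreateRemoteThread', 'VirtualAllocEx', 'WriteProcessMemory',
--         'LoadLibrary', 'GetProcAddress', 'WinExec', 'ShellExecute',
--         'regsvr32', 'rundll32', 'powershell', 'cmd.exe', 'wscript',
--         'cscript', 'schtasks', 'taskkill', 'net user', 'net localgroup',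
--         'encrypt', 'decrypt', 'ransom', 'bitcoin', 'wallet', 'keylogger',
--         'backdoor', 'trojan', 'virus', 'malware'
--     ]
--
--     found = []
--     for string in strings:
--         lower_string = string.lower()
--         for pattern in suspicious_patterns:
--             if pattern in lower_string and string not in found:
--                 found.append(string)
--
--     return found
-- ===== SOURCE B (Python) =====
-- def _find_suspicious_strings(strings):
--     """Find suspicious strings in file"""
--     suspicious_patterns = [
--         'CreateRemoteThread', 'VirtualAllocEx', 'WriteProcessMemory',
--         'LoadLibrary', 'GetProcAddress', 'WinExec', 'ShellExecute',
--         'regsvr32', 'rundll32', 'powershell', 'cmd.exe', 'wscript',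
--         'cscript', 'schtasks', 'taskkill', 'net user', 'net localgroup',
--         'encrypt', 'decrypt', 'ransom', 'bitcoin', 'wallet', 'keylogger',
--         'backdoor', 'trojan', 'virus', 'malware'
--     ]
--
--     def is_suspicious(low):
--         # one left-to-right scan over the text: at each position try to start a pattern
--         for i in range(len(low)):
--             ch = low[i]
--             for p in suspicious_patterns:
--                 if p[0] == ch and low.startswith(p, i):
--                     return True
--         return False
--
--     found = []
--     seen = set()
--     for s in strings:
--         if s not in seen and is_suspicious(s.lower()):
--             seen.add(s)
--             found.append(s)
--     return found
-- ===== Notes on version B (the rewrite author's own statement) =====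
-- stated objective: alternative
-- what changed: A runs a full substring-containment scan per pattern and appends inside the inner pattern loop guarded by an O(n) list-membership dedup; B instead makes a single left-to-right scan over each lowercased string, attempting to start a pattern at each position (first-char filter + prefix test), decides match/no-match once per string, and dedups with a hash seen-set in a separate single output pass.
import Mathlib
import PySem

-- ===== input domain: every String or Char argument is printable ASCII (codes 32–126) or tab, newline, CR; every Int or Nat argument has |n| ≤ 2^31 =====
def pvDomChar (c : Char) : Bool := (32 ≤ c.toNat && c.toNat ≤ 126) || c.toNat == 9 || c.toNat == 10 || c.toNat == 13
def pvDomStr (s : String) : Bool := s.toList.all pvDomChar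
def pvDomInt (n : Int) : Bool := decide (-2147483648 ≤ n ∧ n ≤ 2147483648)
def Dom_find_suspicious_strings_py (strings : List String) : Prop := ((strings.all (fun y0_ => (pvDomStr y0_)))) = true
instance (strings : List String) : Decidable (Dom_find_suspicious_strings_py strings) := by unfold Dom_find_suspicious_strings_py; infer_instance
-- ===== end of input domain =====

-- B replaces A's per-pattern containment scans (append inside the inner loop, list-membership dedup)
-- by one left-to-right positional scan per string (first-char filter + prefix test) and a seen-set
-- dedup in a separate output pass — an alternative matching strategy, same results.

-- ===== PORT A =====
def pvSuspiciousPatterns : List String :=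
  ["CreateRemoteThread", "VirtualAllocEx", "WriteProcessMemory",
   "LoadLibrary", "GetProcAddress", "WinExec", "ShellExecute",
   "regsvr32", "rundll32", "powershell", "cmd.exe", "wscript",
   "cscript", "schtasks", "taskkill", "net user", "net localgroup",
   "encrypt", "decrypt", "ransom", "bitcoin", "wallet", "keylogger",
   "backdoor", "trojan", "virus", "malware"]

def find_suspicious_strings_py (strings : List String) : List String :=
  strings.foldl (fun found s =>
    let lower_string := PySem.Str.lower s
    pvSuspiciousPatterns.foldl (fun found pattern =>
      if PySem.Str.isIn pattern lower_string && !(found.contains s) then found ++ [s]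
      else found) found) []

-- ===== PORT B =====
-- Source B's is_suspicious: scan positions i of low; at each, try to start a pattern (p[0] == low[i]
-- and low.startswith(p, i)). Python's low.startswith(p, i) with 0 ≤ i ≤ len(low) is exactly
-- "p is a prefix of low[i:]", ported by hand as PySem.Chars.startswith (low.drop i) p.toList (exact here).
def pvIsSuspicious (low : List Char) : Bool :=
  (List.range low.length).any (fun i =>
    pvSuspiciousPatterns.any (fun p =>
      p.toList.head? == some (low.getD i ' ') && PySem.Chars.startswith (low.drop i) p.toList))

def find_suspicious_strings_py_alt (strings : List String) : List String :=
  (strings.foldl (fun (st : List String × PySem.Set String) s =>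
      if !(PySem.Set.contains st.2 s) && pvIsSuspicious (PySem.Str.lower s).toList
      then (st.1 ++ [s], PySem.Set.add st.2 s) else st)
    ([], PySem.Set.empty)).1

-- ===== PRECONDITION & SPEC =====
def Spec_find_suspicious_strings_py (strings : List String) (out : List String) : Prop := out = find_suspicious_strings_py_alt strings
instance (strings : List String) (out : List String) : Decidable (Spec_find_suspicious_strings_py strings out) := by unfold Spec_find_suspicious_strings_py; infer_instance

-- ===== CLAIM (what is proved, stated in full; the proofs are below) =====
def Claim_equal_find_suspicious_strings_py : Prop := ∀ (strings : List String), Dom_find_suspicious_strings_py strings → Spec_find_suspicious_strings_py strings (find_suspicious_strings_py strings)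

-- ===== LEMMAS AND PROOFS =====

-- every hard-coded pattern is a nonempty string
theorem pv_pats_ne : ∀ p ∈ pvSuspiciousPatterns, p.toList ≠ [] := by decide

-- B's positional scan finds a match iff some pattern occurs as a substring
theorem pv_match (low : List Char) :
    pvIsSuspicious low
      = pvSuspiciousPatterns.any (fun p => PySem.Chars.isIn p.toList low) := by
  rw [Bool.eq_iff_iff]
  unfold pvIsSuspicious
  simp only [List.any_eq_true, List.mem_range, Bool.and_eq_true, beq_iff_eq]
  constructor
  · rintro ⟨i, _, p, hp, -, hsw⟩
    refine ⟨p, hp, ?_⟩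
    exact (PySem.Chars.exists_prefix_drop_iff_isIn p.toList low).mp
      ⟨i, (PySem.Chars.startswith_iff _ _).mp hsw⟩
  · rintro ⟨p, hp, hIn⟩
    obtain ⟨j, hpre⟩ := (PySem.Chars.exists_prefix_drop_iff_isIn p.toList low).mpr hIn
    obtain ⟨c, t, hct⟩ := List.exists_cons_of_ne_nil (pv_pats_ne p hp)
    have hdrop : low.drop j ≠ [] := by
      intro h
      rw [h, hct] at hpre
      exact absurd (List.prefix_nil.mp hpre) (by simp)
    have hj : j < low.length := by
      by_contra h
      exact hdrop (List.drop_eq_nil_of_le (le_of_not_gt h))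
    refine ⟨j, hj, p, hp, ?_, (PySem.Chars.startswith_iff _ _).mpr hpre⟩
    have hhead : (low.drop j).head? = some c := by
      obtain ⟨r, hr⟩ := hpre
      rw [hct] at hr
      rw [← hr]; rfl
    rw [List.head?_drop] at hhead
    rw [hct]
    simp [List.getD_eq_getElem?_getD, hhead]

-- A's inner pattern loop appends s once iff some pattern matches and s is not yet in found
theorem pv_inner (s low : String) (pats : List String) (f : List String) :
    pats.foldl (fun f p => if PySem.Str.isIn p low && !(f.contains s) then f ++ [s] else f) f
      = if pats.any (fun p => PySem.Str.isIn p low) && !(f.contains s) then f ++ [s] else f := by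
  induction pats generalizing f with
  | nil => simp
  | cons p ps ih =>
    rw [List.foldl_cons, List.any_cons]
    cases hc : f.contains s with
    | true =>
      rw [if_neg (by simp), ih f, hc]
      simp
    | false =>
      cases hp : PySem.Str.isIn p low with
      | true =>
        rw [if_pos (by simp), ih (f ++ [s])]
        have hcc : (f ++ [s]).contains s = true := by simp
        rw [hcc]
        simp
      | false =>
        rw [if_neg (by simp), ih f, hc]
        simp

-- the two outer loops agree, with B's seen set staying equal to its output list
theorem pv_fold (strings : List String) (found : List String) :
    strings.foldl (fun (st : List String × PySem.Set String) s =>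
        if !(PySem.Set.contains st.2 s) && pvIsSuspicious (PySem.Str.lower s).toList
        then (st.1 ++ [s], PySem.Set.add st.2 s) else st) (found, found)
      = (strings.foldl (fun fd s =>
          pvSuspiciousPatterns.foldl (fun fd pattern =>
            if PySem.Str.isIn pattern (PySem.Str.lower s) && !(fd.contains s) then fd ++ [s]
            else fd) fd) found,
         strings.foldl (fun fd s =>
          pvSuspiciousPatterns.foldl (fun fd pattern =>
            if PySem.Str.isIn pattern (PySem.Str.lower s) && !(fd.contains s) then fd ++ [s]
            else fd) fd) found) := by
  induction strings generalizing found with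
  | nil => rfl
  | cons s rest ih =>
    simp only [List.foldl_cons]
    rw [pv_inner]
    have hmatch : pvIsSuspicious (PySem.Str.lower s).toList
        = pvSuspiciousPatterns.any (fun p => PySem.Str.isIn p (PySem.Str.lower s)) := by
      rw [pv_match]
      simp [PySem.Str.isIn]
    have hcond : (!(PySem.Set.contains found s) && pvIsSuspicious (PySem.Str.lower s).toList)
        = ((pvSuspiciousPatterns.any fun p => PySem.Str.isIn p (PySem.Str.lower s))
            && !(found.contains s)) := by
      rw [hmatch, Bool.and_comm]
      rfl
    rw [hcond]
    cases h : (pvSuspiciousPatterns.any fun p => PySem.Str.isIn p (PySem.Str.lower s))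
        && !(found.contains s) with
    | true =>
      rw [if_pos rfl, if_pos rfl]
      have hc : found.contains s = false := by
        rcases Bool.and_eq_true .. |>.mp h with ⟨-, h2⟩
        simpa using h2
      have hadd : PySem.Set.add found s = found ++ [s] := by
        simp only [PySem.Set.add, PySem.Set.contains]
        rw [if_neg (by rw [hc]; simp)]
      rw [hadd]
      exact ih (found ++ [s])
    | false =>
      rw [if_neg (by simp), if_neg (by simp)]
      exact ih found

-- ===== VERDICT (by name: the statement is the Claim_ definition above) =====
theorem find_suspicious_strings_py_spec : Claim_equal_find_suspicious_strings_py := by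
  intro strings _
  unfold Spec_find_suspicious_strings_py find_suspicious_strings_py find_suspicious_strings_py_alt
  have h := pv_fold strings []
  simp only [PySem.Set.empty] at h ⊢
  rw [h]
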